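-- pv_equiv track=rewrite | github.com/junyounglee-rgb/COS_Design | quest_tool/quest_writer.py | suggest_next_event_key
-- ===== SOURCE A (Python) =====
-- def suggest_next_event_key(existing_keys: set[int], group_base: int) -> int:
--     """group_base+1 ~ group_base+99 범위에서 사용 안 된 최소 int 반환.
--
--     예: group_base=100, existing_keys={101} → 102 반환
--         group_base=300, existing_keys={} → 301 반환
--
--     Raises:
--         ValueError: 범위 내 공간 없음 (group_base+1 ~ group_base+99 전부 사용 중)
--     """
--     lo = group_base + 1
--     hi = group_base + 99
--     for candidate in range(lo, hi + 1):
--         if candidate not in existing_keys: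
--             return candidate
--     raise ValueError(
--         f"이벤트 ^key 범위 {lo}~{hi} 가 꽉 찼습니다. (group_base={group_base})"
--     )
-- ===== SOURCE B (Python) =====
-- def suggest_next_event_key(existing_keys: set[int], group_base: int) -> int:
--     lo = group_base + 1
--     hi = group_base + 99
--     cand = lo
--     for k in sorted(set(existing_keys)):
--         if k > cand:
--             break
--         if k == cand:
--             cand += 1
--     if cand > hi:
--         raise ValueError(
--             f"이벤트 ^key 범위 {lo}~{hi} 가 꽉 찼습니다. (group_base={group_base})"
--         )
--     return cand
-- ===== Notes on version B (the rewrite author's own statement) =====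
-- stated objective: alternative
-- what changed: Replaces A's first-miss scan over the whole candidate range with a sort-then-walk: sort the distinct existing keys once and advance a single candidate counter past consecutive occupied keys, stopping at the first gap; raises the same ValueError when the counter leaves the range.
import Mathlib
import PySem

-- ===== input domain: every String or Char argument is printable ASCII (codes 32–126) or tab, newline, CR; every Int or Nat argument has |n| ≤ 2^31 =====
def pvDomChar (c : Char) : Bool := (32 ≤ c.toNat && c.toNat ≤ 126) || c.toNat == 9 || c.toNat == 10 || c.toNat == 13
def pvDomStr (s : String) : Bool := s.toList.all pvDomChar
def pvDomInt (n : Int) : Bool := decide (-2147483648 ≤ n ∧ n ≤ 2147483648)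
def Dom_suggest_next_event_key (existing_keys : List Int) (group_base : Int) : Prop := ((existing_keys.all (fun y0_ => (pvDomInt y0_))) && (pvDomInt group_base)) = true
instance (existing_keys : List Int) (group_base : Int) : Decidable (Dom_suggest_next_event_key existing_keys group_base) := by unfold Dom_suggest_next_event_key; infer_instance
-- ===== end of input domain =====

-- B replaces A's first-miss scan over the candidate range by sorting the distinct keys once and
-- walking a candidate counter past consecutive occupied keys; same ValueError outside Pre_.
-- ===== PORT A =====
def suggest_next_event_key (existing_keys : List Int) (group_base : Int) : Int :=
  let lo := group_base + 1
  let hi := group_base + 99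
  ((PySem.List.pyRange lo (hi + 1) 1).find? (fun c => !(existing_keys.contains c))).getD 0

-- ===== PORT B =====
-- the for-loop with break: advance cand past k == cand, stop at the first k > cand
def pvWalk (cand : Int) : List Int → Int
  | [] => cand
  | k :: rest => if k > cand then cand else if k == cand then pvWalk (cand + 1) rest else pvWalk cand rest

def suggest_next_event_key_alt (existing_keys : List Int) (group_base : Int) : Int :=
  let lo := group_base + 1
  pvWalk lo (PySem.List.sorted (PySem.Set.ofList existing_keys) (fun x => x) false)

-- ===== PRECONDITION & SPEC =====
-- Pre_ excludes exactly the inputs where the whole range group_base+1 .. group_base+99 is occupied: there A raises ValueError (B raises the same).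
def Pre_suggest_next_event_key (existing_keys : List Int) (group_base : Int) : Prop :=
  ∃ c ∈ PySem.List.pyRange (group_base + 1) (group_base + 100) 1, c ∉ existing_keys
instance (existing_keys : List Int) (group_base : Int) : Decidable (Pre_suggest_next_event_key existing_keys group_base) := by unfold Pre_suggest_next_event_key; infer_instance
def pvWitness_suggest_next_event_key : List Int × Int := ([101], 100)

def Spec_suggest_next_event_key (existing_keys : List Int) (group_base : Int) (out : Int) : Prop := out = suggest_next_event_key_alt existing_keys group_base
instance (existing_keys : List Int) (group_base : Int) (out : Int) : Decidable (Spec_suggest_next_event_key existing_keys group_base out) := by unfold Spec_suggest_next_event_key; infer_instance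

-- ===== CLAIM (what is proved, stated in full; the proofs are below) =====
def Claim_equal_suggest_next_event_key : Prop := ∀ (existing_keys : List Int) (group_base : Int), Dom_suggest_next_event_key existing_keys group_base → Pre_suggest_next_event_key existing_keys group_base → Spec_suggest_next_event_key existing_keys group_base (suggest_next_event_key existing_keys group_base)

-- ===== LEMMAS AND PROOFS =====
theorem pvWalk_ge (s : List Int) (cand : Int) : cand ≤ pvWalk cand s := by
  induction s generalizing cand with
  | nil => simp [pvWalk]
  | cons k rest ih =>
    simp only [pvWalk]
    split_ifs with h1 h2
    · exact le_refl _
    · exact le_trans (by omega) (ih (cand + 1))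
    · exact ih cand

theorem pvWalk_not_mem (s : List Int) (cand : Int) (hs : s.Pairwise (· < ·)) :
    pvWalk cand s ∉ s := by
  induction s generalizing cand with
  | nil => simp
  | cons k rest ih =>
    rcases List.pairwise_cons.mp hs with ⟨hk, hrest⟩
    simp only [pvWalk]
    split_ifs with h1 h2
    · simp only [List.mem_cons, not_or]
      refine ⟨by omega, fun hm => ?_⟩
      have := hk _ hm; omega
    · simp only [List.mem_cons, not_or]
      refine ⟨?_, ih (cand + 1) hrest⟩
      have := pvWalk_ge rest (cand + 1)
      simp only [beq_iff_eq] at h2; omega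
    · simp only [List.mem_cons, not_or]
      refine ⟨?_, ih cand hrest⟩
      have := pvWalk_ge rest cand
      simp only [beq_iff_eq] at h2; omega

theorem pvWalk_min (s : List Int) (cand y : Int) (hy : cand ≤ y) (hlt : y < pvWalk cand s) :
    y ∈ s := by
  induction s generalizing cand with
  | nil => simp [pvWalk] at hlt; omega
  | cons k rest ih =>
    simp only [pvWalk] at hlt
    split_ifs at hlt with h1 h2
    · omega
    · simp only [beq_iff_eq] at h2
      by_cases hyc : y = cand
      · simp [hyc, h2]
      · exact List.mem_cons_of_mem _ (ih (cand + 1) (by omega) hlt)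
    · exact List.mem_cons_of_mem _ (ih cand hy hlt)

-- characterisation: find? over a strictly increasing list returns w when w is in it, p w holds,
-- and p fails on every smaller element of the list
theorem find?_pyRange_eq (p : Int → Bool) (a b w : Int) (hw : a ≤ w ∧ w < b) (hpw : p w = true)
    (hmin : ∀ y, a ≤ y → y < w → p y = false) :
    (PySem.List.pyRange a b 1).find? p = some w := by
  rw [PySem.List.pyRange_one_append a w b (by omega) (by omega), List.find?_append]
  have h1 : (PySem.List.pyRange a w 1).find? p = none := by
    rw [List.find?_eq_none]
    intro x hx
    rw [PySem.List.mem_pyRange_one] at hx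
    simp [hmin x hx.1 hx.2]
  rw [h1]
  simp
  rw [PySem.List.pyRange_one_cons (by omega)]
  simp [hpw]

-- ===== VERDICT (by name: the statement is the Claim_ definition above) =====
theorem suggest_next_event_key_spec : Claim_equal_suggest_next_event_key := by
  intro ks gb _ hpre
  unfold Spec_suggest_next_event_key suggest_next_event_key suggest_next_event_key_alt
  simp only []
  set s := PySem.List.sorted (PySem.Set.ofList ks) (fun x => x) false with hs
  have hmem : ∀ x, x ∈ s ↔ x ∈ ks := by
    intro x
    rw [hs, PySem.List.mem_sorted, PySem.Set.mem_ofList]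
  have hpair : s.Pairwise (· < ·) := PySem.List.sorted_ofList_pairwise_lt ks
  set w := pvWalk (gb + 1) s with hw
  have hwge : gb + 1 ≤ w := pvWalk_ge s (gb + 1)
  have hwnot : w ∉ ks := fun h => pvWalk_not_mem s (gb + 1) hpair ((hmem w).mpr h)
  have hwlt : w < gb + 100 := by
    obtain ⟨c, hcr, hcn⟩ := hpre
    rw [PySem.List.mem_pyRange_one] at hcr
    by_contra hcon
    exact hcn ((hmem c).mp (pvWalk_min s (gb + 1) c hcr.1 (by omega)))
  rw [find?_pyRange_eq (fun c => !(ks.contains c)) (gb + 1) (gb + 99 + 1) w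
    ⟨hwge, by omega⟩ (by simpa using hwnot)
    (fun y hy hylt => by
      have : y ∈ ks := (hmem y).mp (pvWalk_min s (gb + 1) y hy hylt)
      simpa using this)]
  rfl
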